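-- pv_equiv track=rewrite | github.com/RationalEar/spam-detection | explainability/BertShapMetrics.py | _create_masked_text
-- ===== SOURCE A (Python) =====
-- from typing import List, Dict, Tuple
--
-- def _create_masked_text(text: str, mask_indices: List[int],
--                        mask_strategy: str = 'remove') -> str:
--     """
--     Create a masked version of the text
--
--     Args:
--         text: Original text
--         mask_indices: Indices of tokens to mask
--         mask_strategy: How to mask ('remove', 'replace', 'mask_token')
--
--     Returns:
--         Masked text string
--     """
--     # For BERT, we work with words rather than subword tokens for simplicity
--     words = text.split()
--
--     # Filter out indices that are out of bounds
--     valid_mask_indices = [idx for idx in mask_indices if idx < len(words)]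
--
--     if mask_strategy == 'remove':
--         # Remove masked words
--         masked_words = [word for i, word in enumerate(words) if i not in valid_mask_indices]
--     elif mask_strategy == 'replace':
--         # Replace with generic token
--         masked_words = []
--         for i, word in enumerate(words):
--             if i in valid_mask_indices:
--                 masked_words.append('<UNK>')
--             else:
--                 masked_words.append(word)
--     elif mask_strategy == 'mask_token':
--         # Replace with BERT's [MASK] token
--         masked_words = []
--         for i, word in enumerate(words):
--             if i in valid_mask_indices:
--                 masked_words.append('[MASK]')
--             else:
--                 masked_words.append(word)
--     else:
--         # Default: remove words
--         masked_words = [word for i, word in enumerate(words) if i not in valid_mask_indices]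
--
--     return ' '.join(masked_words)
-- ===== SOURCE B (Python) =====
-- def _create_masked_text(text, mask_indices, mask_strategy='remove'):
--     words = text.split()
--     # distinct in-range indices, first occurrence order
--     valid = list(dict.fromkeys(i for i in mask_indices if 0 <= i < len(words)))
--     if mask_strategy in ('replace', 'mask_token'):
--         token = '<UNK>' if mask_strategy == 'replace' else '[MASK]'
--         out = list(words)
--         for i in valid:
--             out[i] = token
--         return ' '.join(out)
--     # 'remove' and any other strategy: delete positions back-to-front
--     out = list(words)
--     for i in sorted(valid, reverse=True):
--         del out[i]
--     return ' '.join(out)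
-- ===== Notes on version B (the rewrite author's own statement) =====
-- stated objective: idiomatic
-- what changed: B computes the distinct in-range indices once and addresses them directly -- assigning the strategy's single replacement token at each index into a copy of the word list, or deleting the indices back-to-front after a descending sort -- instead of A's scan over all words with a per-position membership test in every branch.
import Mathlib
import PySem

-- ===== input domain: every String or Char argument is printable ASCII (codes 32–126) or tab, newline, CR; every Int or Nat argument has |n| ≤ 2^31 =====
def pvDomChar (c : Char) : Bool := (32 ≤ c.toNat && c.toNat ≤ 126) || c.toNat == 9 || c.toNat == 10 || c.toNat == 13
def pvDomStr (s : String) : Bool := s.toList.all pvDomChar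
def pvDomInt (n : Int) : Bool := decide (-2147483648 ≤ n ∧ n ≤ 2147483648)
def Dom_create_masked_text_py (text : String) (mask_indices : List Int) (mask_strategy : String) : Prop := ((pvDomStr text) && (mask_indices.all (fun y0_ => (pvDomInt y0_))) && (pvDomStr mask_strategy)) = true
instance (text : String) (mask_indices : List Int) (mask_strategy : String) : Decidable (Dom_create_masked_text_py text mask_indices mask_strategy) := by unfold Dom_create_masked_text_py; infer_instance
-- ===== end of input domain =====

-- B (idiomatic): selects the replacement token once and writes it at the valid indices
-- directly (or deletes them back-to-front), instead of A's scan of all words with a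
-- membership test per position.  Equivalence of the RETURN value is proved below.

-- ===== PORT A =====
def create_masked_text_py (text : String) (mask_indices : List Int) (mask_strategy : String) : String :=
  let words := PySem.Str.split₀ text
  let valid_mask_indices := mask_indices.filter (fun idx => decide (idx < (words.length : Int)))
  let masked_words : List String :=
    if mask_strategy = "remove" then
      ((PySem.List.enumerate words).filter (fun p => !decide (p.1 ∈ valid_mask_indices))).map (fun p => p.2)
    else if mask_strategy = "replace" then
      (PySem.List.enumerate words).foldl
        (fun acc p => acc ++ [if p.1 ∈ valid_mask_indices then "<UNK>" else p.2]) []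
    else if mask_strategy = "mask_token" then
      (PySem.List.enumerate words).foldl
        (fun acc p => acc ++ [if p.1 ∈ valid_mask_indices then "[MASK]" else p.2]) []
    else
      ((PySem.List.enumerate words).filter (fun p => !decide (p.1 ∈ valid_mask_indices))).map (fun p => p.2)
  PySem.Str.join " " masked_words

-- ===== PORT B =====
def create_masked_text_py_alt (text : String) (mask_indices : List Int) (mask_strategy : String) : String :=
  let words := PySem.Str.split₀ text
  let valid := PySem.List.dedup (mask_indices.filter (fun i => decide (0 ≤ i) && decide (i < (words.length : Int))))
  if mask_strategy = "replace" ∨ mask_strategy = "mask_token" then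
    let token := if mask_strategy = "replace" then "<UNK>" else "[MASK]"
    PySem.Str.join " " (valid.foldl (fun out i => PySem.List.pySetD out i token) words)
  else
    PySem.Str.join " "
      ((PySem.List.sorted valid (fun x => x) true).foldl (fun out i => out.eraseIdx i.toNat) words)

-- ===== PRECONDITION & SPEC =====
def Spec_create_masked_text_py (text : String) (mask_indices : List Int) (mask_strategy : String) (out : String) : Prop := out = create_masked_text_py_alt text mask_indices mask_strategy
instance (text : String) (mask_indices : List Int) (mask_strategy : String) (out : String) : Decidable (Spec_create_masked_text_py text mask_indices mask_strategy out) := by unfold Spec_create_masked_text_py; infer_instance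

-- ===== CLAIM (what is proved, stated in full; the proofs are below) =====
def Claim_equal_create_masked_text_py : Prop := ∀ (text : String) (mask_indices : List Int) (mask_strategy : String), Dom_create_masked_text_py text mask_indices mask_strategy → Spec_create_masked_text_py text mask_indices mask_strategy (create_masked_text_py text mask_indices mask_strategy)

-- ===== LEMMAS AND PROOFS =====

-- A's append-accumulator loop over enumerate is a map.
theorem pv_foldl_append_map {α β : Type} (l : List α) (f : α → β) (acc : List β) :
    l.foldl (fun acc p => acc ++ [f p]) acc = acc ++ l.map f := by
  induction l generalizing acc with
  | nil => simp
  | cons x xs ih => simp [List.foldl_cons, ih, List.append_assoc]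

-- value of B's assignment fold at every position
theorem pv_setfold_get? {α : Type} (S : List Int) (ws : List α) (tok : α)
    (hS : ∀ i ∈ S, 0 ≤ i ∧ i < (ws.length : Int)) (k : Nat) :
    (S.foldl (fun l i => PySem.List.pySetD l i tok) ws)[k]?
      = if (k : Int) ∈ S then some tok else ws[k]? := by
  induction S generalizing ws with
  | nil => simp
  | cons i S ih =>
    obtain ⟨h0, hilen⟩ := hS i (List.mem_cons_self ..)
    have hSb : ∀ j ∈ S, 0 ≤ j ∧ j < ((ws.set i.toNat tok).length : Int) := by
      intro j hj
      have := hS j (List.mem_cons_of_mem _ hj)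
      simpa using this
    simp only [List.foldl_cons, PySem.List.pySetD_of_nonneg ws tok h0]
    rw [ih (ws.set i.toNat tok) hSb]
    by_cases hmem : (k : Int) ∈ S
    · simp [hmem]
    · by_cases hik : (k : Int) = i
      · have heq : i.toNat = k := by omega
        have hklen : k < ws.length := by omega
        simp [hik, heq, hklen]
      · have hne : i.toNat ≠ k := by omega
        simp [hmem, hik, List.getElem?_set_ne, hne]

-- B's descending deletion fold equals A's keep-the-unmasked filter.
theorem pv_erasefold {α : Type} (S : List Int) (ws : List α)
    (hdesc : S.Pairwise (fun a b => b < a))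
    (hS : ∀ i ∈ S, 0 ≤ i ∧ i < (ws.length : Int)) :
    S.foldl (fun l i => l.eraseIdx i.toNat) ws
      = ((PySem.List.enumerate ws).filter (fun p => !decide (p.1 ∈ S))).map (fun p => p.2) := by
  induction S generalizing ws with
  | nil => simp [PySem.List.map_snd_enumerate]
  | cons j S ih =>
    obtain ⟨hj0, hjlen⟩ := hS j (List.mem_cons_self ..)
    have hjn : j.toNat < ws.length := by omega
    have hlt : ∀ i ∈ S, i < j := by
      intro i hi; exact (List.pairwise_cons.mp hdesc).1 i hi
    have hSb : ∀ i ∈ S, 0 ≤ i ∧ i < ((ws.eraseIdx j.toNat).length : Int) := by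
      intro i hi
      obtain ⟨h1, _⟩ := hS i (List.mem_cons_of_mem _ hi)
      have := hlt i hi
      rw [List.length_eraseIdx_of_lt hjn]
      constructor
      · exact h1
      · omega
    rw [List.foldl_cons, ih _ ((List.pairwise_cons.mp hdesc).2) hSb]
    -- decompose ws around position j
    have hws : ws = ws.take j.toNat ++ ws[j.toNat] :: ws.drop (j.toNat + 1) := by
      conv_lhs => rw [← List.take_append_drop j.toNat ws]
      rw [List.getElem_cons_drop]
    have herase : ws.eraseIdx j.toNat = ws.take j.toNat ++ ws.drop (j.toNat + 1) :=
      List.eraseIdx_eq_take_drop_succ ..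
    have hta : (ws.take j.toNat).length = j.toNat := by
      simp [List.length_take]; omega
    rw [herase]
    conv_rhs => rw [hws]
    rw [PySem.List.enumerate_append, PySem.List.enumerate_append, hta]
    simp only [zero_add]
    rw [List.filter_append, List.filter_append, List.map_append, List.map_append]
    congr 1
    · -- front part: indices < j, membership in S and in j::S coincide
      congr 1
      apply List.filter_congr
      intro p hp
      obtain ⟨k, hkl, hpk⟩ := (PySem.List.mem_enumerate_iff _ _ _).mp hp
      have hklen : k < j.toNat := by simpa [hta] using hkl
      have hpne : p.1 ≠ j := by subst hpk; simp; omega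
      simp [List.mem_cons, hpne]
    · -- the deleted element is filtered out on the right; tails keep everything
      have hji : ((j.toNat : Int)) = j := by omega
      have hfalse : (!decide (((j.toNat : Int)) ∈ j :: S)) = false := by simp [hji]
      rw [PySem.List.enumerate_cons, List.filter_cons]
      simp only [hfalse, Bool.false_eq_true, if_false]
      have tail1 : ∀ p ∈ PySem.List.enumerate (ws.drop (j.toNat + 1)) (j.toNat : Int),
          (!decide (p.1 ∈ S)) = true := by
        intro p hp
        obtain ⟨k, hkl, hpk⟩ := (PySem.List.mem_enumerate_iff _ _ _).mp hp
        subst hpk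
        simp only [Bool.not_eq_true', decide_eq_false_iff_not]
        intro hmem
        have := hlt _ hmem
        omega
      have tail2 : ∀ p ∈ PySem.List.enumerate (ws.drop (j.toNat + 1)) ((j.toNat : Int) + 1),
          (!decide (p.1 ∈ j :: S)) = true := by
        intro p hp
        obtain ⟨k, hkl, hpk⟩ := (PySem.List.mem_enumerate_iff _ _ _).mp hp
        subst hpk
        simp only [Bool.not_eq_true', decide_eq_false_iff_not, List.mem_cons]
        rintro (h | hmem)
        · omega
        · have := hlt _ hmem; omega
      rw [List.filter_eq_self.mpr tail1, List.filter_eq_self.mpr tail2]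
      simp [PySem.List.map_snd_enumerate]

-- membership in A's valid list and B's valid list agree on actual word positions
theorem pv_mem_equiv (mi : List Int) (n k : Nat) (_hk : k < n) :
    ((k : Int) ∈ mi.filter (fun idx => decide (idx < (n : Int))) ↔
     (k : Int) ∈ PySem.List.dedup (mi.filter (fun i => decide (0 ≤ i) && decide (i < (n : Int))))) := by
  simp only [PySem.List.mem_dedup, List.mem_filter, decide_eq_true_eq, Bool.and_eq_true]
  constructor
  · rintro ⟨h1, h2⟩; exact ⟨h1, by omega, h2⟩
  · rintro ⟨h1, _, h3⟩; exact ⟨h1, h3⟩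

-- the replace / mask_token case
theorem pv_replace_case (words : List String) (mi : List Int) (tok : String) :
    (PySem.List.enumerate words).foldl
        (fun acc p => acc ++ [if p.1 ∈ mi.filter (fun idx => decide (idx < (words.length : Int))) then tok else p.2]) []
      = (PySem.List.dedup (mi.filter (fun i => decide (0 ≤ i) && decide (i < (words.length : Int))))).foldl
          (fun out i => PySem.List.pySetD out i tok) words := by
  set vB := PySem.List.dedup (mi.filter (fun i => decide (0 ≤ i) && decide (i < (words.length : Int)))) with hvB
  have hvBb : ∀ i ∈ vB, 0 ≤ i ∧ i < (words.length : Int) := by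
    intro i hi
    rw [hvB, PySem.List.mem_dedup, List.mem_filter] at hi
    have := hi.2; simp at this; omega
  rw [pv_foldl_append_map, List.nil_append]
  apply List.ext_getElem?
  intro k
  rw [pv_setfold_get? vB words tok hvBb k]
  by_cases hk : k < words.length
  · have hke : k < (PySem.List.enumerate words).length := by
      simpa [PySem.List.length_enumerate] using hk
    rw [List.getElem?_eq_getElem (l := (PySem.List.enumerate words).map _) (by simpa using hke)]
    simp only [List.getElem_map, PySem.List.getElem_enumerate, Int.zero_add,
      List.getElem?_eq_getElem hk]
    by_cases hmem : (k : Int) ∈ vB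
    · rw [if_pos ((pv_mem_equiv mi words.length k hk).mpr hmem), if_pos hmem]
    · rw [if_neg (fun h => hmem ((pv_mem_equiv mi words.length k hk).mp h)), if_neg hmem]
  · have hmem : (k : Int) ∉ vB := by
      intro h; have := hvBb _ h; omega
    rw [if_neg hmem, List.getElem?_eq_none, List.getElem?_eq_none]
    · omega
    · simpa [PySem.List.length_enumerate] using (by omega : ¬ k < words.length)

-- the remove / default case
theorem pv_remove_case (words : List String) (mi : List Int) :
    ((PySem.List.enumerate words).filter
        (fun p => !decide (p.1 ∈ mi.filter (fun idx => decide (idx < (words.length : Int)))))).map (fun p => p.2)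
      = (PySem.List.sorted (PySem.List.dedup (mi.filter (fun i => decide (0 ≤ i) && decide (i < (words.length : Int))))) (fun x => x) true).foldl
          (fun out i => out.eraseIdx i.toNat) words := by
  set vB := PySem.List.dedup (mi.filter (fun i => decide (0 ≤ i) && decide (i < (words.length : Int)))) with hvB
  set S := PySem.List.sorted vB (fun x => x) true with hS
  have hmemS : ∀ i, i ∈ S ↔ i ∈ vB := by
    intro i; rw [hS, PySem.List.mem_sorted]
  have hbound : ∀ i ∈ S, 0 ≤ i ∧ i < (words.length : Int) := by
    intro i hi
    rw [hmemS, hvB, PySem.List.mem_dedup, List.mem_filter] at hi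
    have := hi.2; simp at this; omega
  have hvBnd : vB.Nodup := by rw [hvB]; exact PySem.List.nodup_dedup _
  have hnodup : S.Nodup := (PySem.List.sorted_perm vB (fun x => x) true).nodup_iff.mpr hvBnd
  have hge : S.Pairwise (fun a b => (fun x => x) b ≤ (fun x => x) a) :=
    PySem.List.sorted_pairwise_rev vB (fun x => x)
  have hdesc : S.Pairwise (fun a b => b < a) := by
    have := hge.and hnodup
    exact this.imp (fun h => lt_of_le_of_ne h.1 (Ne.symm h.2))
  rw [pv_erasefold S words hdesc hbound]
  congr 1
  apply List.filter_congr
  intro p hp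
  obtain ⟨k, hkl, hpk⟩ := (PySem.List.mem_enumerate_iff _ _ _).mp hp
  subst hpk
  simp only [Int.zero_add]
  congr 1
  by_cases hm : (k : Int) ∈ S
  · simp [hm, ((pv_mem_equiv mi words.length k hkl).mpr ((hmemS _).mp hm))]
  · have : (k:Int) ∉ mi.filter (fun idx => decide (idx < (words.length : Int))) := by
      intro h; exact hm ((hmemS _).mpr ((pv_mem_equiv mi words.length k hkl).mp h))
    simp [hm, this]

-- ===== VERDICT (by name: the statement is the Claim_ definition above) =====
theorem create_masked_text_py_spec : Claim_equal_create_masked_text_py := by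
  intro text mi strat _
  unfold Spec_create_masked_text_py create_masked_text_py create_masked_text_py_alt
  simp only []
  by_cases hr : strat = "replace"
  · subst hr
    simp only [String.reduceEq, if_true, if_false, true_or]
    rw [pv_replace_case]
  · by_cases hm : strat = "mask_token"
    · subst hm
      simp only [String.reduceEq, if_true, if_false, or_true]
      rw [pv_replace_case]
    · have hnot : ¬ (strat = "replace" ∨ strat = "mask_token") := by tauto
      by_cases hrem : strat = "remove"
      · subst hrem
        simp only [String.reduceEq, if_true, if_false, or_self]
        rw [pv_remove_case]
      · simp only [if_neg hrem, if_neg hr, if_neg hm, if_neg hnot]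
        rw [pv_remove_case]
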